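-- pv_equiv track=rewrite | github.com/LeoGCRocha/formais-e-compiladores | left_recursion.py | fixFirstProd
-- ===== SOURCE A (Python) =====
-- def fixFirstProd(productions):
--     first_value = list(productions)[-1]
--     isLeftRecursive = False
--     for sentence in productions[first_value]:
--         if sentence[0] == first_value:
--             isLeftRecursive = True
--             break
--     if isLeftRecursive:
--         new_dic = productions.copy()
--         # Is left recursive, remove the first symbol
--         newKeyValue = first_value + "'"
--         while newKeyValue in new_dic:
--             newKeyValue = newKeyValue + "'"
--         resursive_values = []
--         not_recursive_values = []
--         for sentence in productions[first_value]:
--             if sentence[0] == first_value: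
--                 # A -> Aa
--                 resursive_values.append(sentence[1:] + " " +newKeyValue)
--             else:
--                 # E -> ab | EC
--                 # E -> abE'
--                 not_recursive_values.append(sentence + " " + newKeyValue)
--         resursive_values.append("&")
--         new_dic[first_value] = not_recursive_values
--         new_dic[newKeyValue] = resursive_values
--         return new_dic
--     else:
--         return productions
-- ===== SOURCE B (Python) =====
-- def fixFirstProd(productions):
--     key = list(productions)[-1]
--     # Stable sort: non-recursive sentences (key False) first, recursive (True) last,
--     # each group keeping its original order; then find the split point from the back.
--     order = sorted(productions[key], key=lambda s: s[:1] == key)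
--     cut = len(order)
--     while cut > 0 and order[cut - 1][:1] == key:
--         cut -= 1
--     if cut == len(order):
--         return productions
--     new_key = key + "'"
--     while new_key in productions:
--         new_key += "'"
--     out = dict(productions)
--     out[key] = [s + " " + new_key for s in order[:cut]]
--     out[new_key] = [s[1:] + " " + new_key for s in order[cut:]] + ["&"]
--     return out
-- ===== Notes on version B (the rewrite author's own statement) =====
-- stated objective: alternative
-- what changed: Replaces A's early-break recursion flag scan plus a second two-accumulator partition loop by a stable sort of the last key's sentences on the boolean 'starts with the key' (non-recursive first, each group in original order), a backward scan locating the split point, and two slices.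
import Mathlib
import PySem

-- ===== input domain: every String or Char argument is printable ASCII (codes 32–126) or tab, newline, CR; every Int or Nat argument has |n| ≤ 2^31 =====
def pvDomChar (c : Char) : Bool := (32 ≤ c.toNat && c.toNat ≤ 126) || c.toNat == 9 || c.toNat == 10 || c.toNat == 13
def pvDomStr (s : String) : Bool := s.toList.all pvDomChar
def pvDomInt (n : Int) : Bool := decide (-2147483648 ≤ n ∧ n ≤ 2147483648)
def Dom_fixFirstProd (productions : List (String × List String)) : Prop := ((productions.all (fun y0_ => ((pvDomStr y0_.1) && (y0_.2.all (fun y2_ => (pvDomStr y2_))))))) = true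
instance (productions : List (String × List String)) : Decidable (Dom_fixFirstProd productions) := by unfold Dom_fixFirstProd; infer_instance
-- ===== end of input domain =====

-- B replaces A's flag scan + two-accumulator partition loop by a stable sort on the
-- boolean "starts with the key" (non-recursive sentences first, each group keeping its
-- original order) followed by a backward scan for the split point and two slices
-- (objective: alternative decomposition, same observable result).

-- ===== PORT A =====
-- while newKeyValue in new_dic: newKeyValue += "'"  — fuel-guarded for totality: each candidate is
-- strictly longer than the last, so after size+1 distinct candidates one is surely not a key.
def pvFreshKey (d : PySem.Dict String (List String)) : Nat → String → String
  | 0, cand => cand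
  | fuel + 1, cand => if d.contains cand then pvFreshKey d fuel (cand ++ "'") else cand

-- sentence[0] == first_value  (Python raises IndexError on an empty sentence: outside Pre_)
def pvHeadIs (first_value sentence : String) : Bool :=
  match PySem.Str.pyGet? sentence 0 with
  | some c => String.ofList [c] == first_value
  | none => false

def fixFirstProd (productions : List (String × List String)) : List (String × List String) :=
  let d := PySem.Dict.ofList productions
  -- list(productions)[-1]; the "" default is only reached on the empty dict (IndexError, outside Pre_)
  let first_value := PySem.List.pyGetD d.keys (-1) ""
  let isLeftRecursive := (d.getD first_value []).any (fun sentence => pvHeadIs first_value sentence)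
  if isLeftRecursive then
    let newKeyValue := pvFreshKey d (d.size + 1) (first_value ++ "'")
    let acc := (d.getD first_value []).foldl
      (fun (acc : List String × List String) sentence =>
        if pvHeadIs first_value sentence then
          (acc.1 ++ [PySem.Str.slice sentence (some 1) none ++ " " ++ newKeyValue], acc.2)
        else
          (acc.1, acc.2 ++ [sentence ++ " " ++ newKeyValue]))
      ([], [])
    ((d.insert first_value acc.2).insert newKeyValue (acc.1 ++ ["&"])).items
  else
    productions

-- ===== PORT B =====
-- s[:1] == key  (slicing, total: "" on the empty sentence)
def pvStartsKey (key s : String) : Bool := PySem.Str.slice s none (some 1) == key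

-- while cut > 0 and order[cut-1][:1] == key: cut -= 1  — structural recursion on cut;
-- order.getD is exact here since the index cut-1 is in range whenever it is read.
def pvCut (p : String → Bool) (order : List String) : Nat → Nat
  | 0 => 0
  | c + 1 => if p (order.getD c "") then pvCut p order c else c + 1

def fixFirstProd_alt (productions : List (String × List String)) : List (String × List String) :=
  let d := PySem.Dict.ofList productions
  let key := PySem.List.pyGetD d.keys (-1) ""
  let order := PySem.List.sorted (d.getD key []) (fun s => pvStartsKey key s) false
  let cut := pvCut (pvStartsKey key) order order.length
  if cut = order.length then
    productions
  else
    let new_key := pvFreshKey d (d.size + 1) (key ++ "'")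
    let nonrecv := (PySem.List.slice order none (some (cut : Int))).map (fun s => s ++ " " ++ new_key)
    let recvals := (PySem.List.slice order (some (cut : Int)) none).map
        (fun s => PySem.Str.slice s (some 1) none ++ " " ++ new_key) ++ ["&"]
    ((d.insert key nonrecv).insert new_key recvals).items

-- ===== PRECONDITION & SPEC =====
-- Pre_ excludes exactly the inputs where the Python A raises: the empty dict (IndexError on
-- list(productions)[-1]) and an empty sentence under the last key (IndexError on sentence[0]).
def Pre_fixFirstProd (productions : List (String × List String)) : Prop :=
  productions ≠ [] ∧
  ∀ s ∈ (PySem.Dict.ofList productions).getD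
      (PySem.List.pyGetD (PySem.Dict.ofList productions).keys (-1) "") [], s ≠ ""
instance (productions : List (String × List String)) : Decidable (Pre_fixFirstProd productions) := by
  unfold Pre_fixFirstProd; infer_instance

def pvWitness_fixFirstProd : (List (String × List String)) := [("E", ["E a", "b"])]

def Spec_fixFirstProd (productions : List (String × List String)) (out : List (String × List String)) : Prop := out = fixFirstProd_alt productions
instance (productions : List (String × List String)) (out : List (String × List String)) : Decidable (Spec_fixFirstProd productions out) := by unfold Spec_fixFirstProd; infer_instance

-- ===== CLAIM (what is proved, stated in full; the proofs are below) =====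
def Claim_equal_fixFirstProd : Prop := ∀ (productions : List (String × List String)), Dom_fixFirstProd productions → Pre_fixFirstProd productions → Spec_fixFirstProd productions (fixFirstProd productions)

-- ===== LEMMAS AND PROOFS =====

-- On a nonempty sentence, A's test 'sentence[0] == key' and B's test 's[:1] == key' agree.
lemma pvHeadIs_eq_startsKey (key s : String) (hs : s ≠ "") :
    pvHeadIs key s = pvStartsKey key s := by
  have hne : s.toList ≠ [] := fun h => hs (String.toList_inj.mp h)
  obtain ⟨c, t, h⟩ := List.exists_cons_of_ne_nil hne
  have hslice : PySem.Str.slice s none (some 1) = String.ofList [c] := by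
    apply String.toList_inj.mp
    simp [h, PySem.List.slice_to, List.take, String.toList_ofList]
  simp [pvHeadIs, pvStartsKey, h, hslice]

lemma any_congr_mem {α : Type} (p q : α → Bool) (l : List α)
    (h : ∀ x ∈ l, p x = q x) : l.any p = l.any q := by
  induction l with
  | nil => rfl
  | cons x xs ih =>
    simp only [List.any_cons, h x (List.mem_cons_self), ih (fun y hy => h y (List.mem_cons_of_mem x hy))]

-- A's interleaved two-accumulator fold is the pair of filtered maps.
lemma foldl_partition {α β : Type} (p : α → Bool) (f g : α → β) (l : List α) :
    ∀ (a1 a2 : List β),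
      l.foldl (fun (acc : List β × List β) x =>
        if p x then (acc.1 ++ [f x], acc.2) else (acc.1, acc.2 ++ [g x])) (a1, a2)
      = (a1 ++ (l.filter p).map f, a2 ++ (l.filter (fun x => !p x)).map g) := by
  induction l with
  | nil => intro a1 a2; simp
  | cons x xs ih =>
    intro a1 a2
    by_cases hx : p x <;> simp [List.foldl_cons, hx, ih]

lemma any_eq_not_isEmpty_filter {α : Type} (p : α → Bool) (l : List α) :
    l.any p = !(l.filter p).isEmpty := by
  induction l with
  | nil => rfl
  | cons x xs ih => by_cases hx : p x <;> simp [List.any_cons, hx, ih]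

-- Inserting a p-true element at the end (before all-false, after all-true never fires).
lemma insertBy_last {α : Type} (p : α → Bool) (x : α) (hx : p x = true) (l : List α) :
    PySem.List.insertBy (fun a b => decide (p a < p b)) x l = l ++ [x] := by
  induction l with
  | nil => rfl
  | cons y ys ih =>
    have h : (decide (p x < p y)) = false := by simp [Bool.lt_iff, hx]
    rw [PySem.List.insertBy, h]
    simp [ih]

-- Inserting a p-false element into (all-false N) ++ (all-true R) goes right at the boundary.
lemma insertBy_boundary {α : Type} (p : α → Bool) (x : α) (hx : p x = false) :
    ∀ (N R : List α), (∀ y ∈ N, p y = false) → (∀ y ∈ R, p y = true) →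
      PySem.List.insertBy (fun a b => decide (p a < p b)) x (N ++ R) = N ++ x :: R := by
  intro N
  induction N with
  | nil =>
    intro R _ hR
    cases R with
    | nil => rfl
    | cons r rs =>
      have h : (decide (p x < p r)) = true := by
        simp [Bool.lt_iff, hx, hR r (List.mem_cons_self)]
      rw [List.nil_append, PySem.List.insertBy, h]
      simp
  | cons y ys ih =>
    intro R hN hR
    have h : (decide (p x < p y)) = false := by
      simp [Bool.lt_iff, hN y (List.mem_cons_self)]
    rw [List.cons_append, PySem.List.insertBy, h]
    simp [ih R (fun z hz => hN z (List.mem_cons_of_mem y hz)) hR]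

-- The insertion-sort fold keeps the invariant "false part ++ true part", each in input order.
lemma foldl_insertBy_bool {α : Type} (p : α → Bool) :
    ∀ (l N R : List α), (∀ y ∈ N, p y = false) → (∀ y ∈ R, p y = true) →
      l.foldl (fun acc x => PySem.List.insertBy (fun a b => decide (p a < p b)) x acc) (N ++ R)
        = (N ++ l.filter (fun x => !p x)) ++ (R ++ l.filter p) := by
  intro l
  induction l with
  | nil => intro N R _ _; simp
  | cons x xs ih =>
    intro N R hN hR
    rw [List.foldl_cons]
    by_cases hx : p x = true
    · rw [show PySem.List.insertBy (fun a b => decide (p a < p b)) x (N ++ R) = N ++ (R ++ [x]) by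
        rw [← List.append_assoc, insertBy_last p x hx]]
      rw [ih N (R ++ [x]) hN (by intro y hy; rcases List.mem_append.mp hy with h | h
                                 · exact hR y h
                                 · simp at h; subst h; exact hx)]
      simp [hx]
    · have hx' : p x = false := by revert hx; cases p x <;> simp
      rw [insertBy_boundary p x hx' N R hN hR,
          show N ++ x :: R = (N ++ [x]) ++ R by simp]
      rw [ih (N ++ [x]) R (by intro y hy; rcases List.mem_append.mp hy with h | h
                              · exact hN y h
                              · simp at h; subst h; exact hx') hR]
      simp [hx']

-- Stable sort on a boolean key is the false-part followed by the true-part.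
lemma sorted_bool_eq_filter_append {α : Type} (p : α → Bool) (l : List α) :
    PySem.List.sorted l (fun x => p x) false
      = l.filter (fun x => !p x) ++ l.filter p := by
  rw [PySem.List.sorted_eq_foldl_insertBy]
  have := foldl_insertBy_bool p l [] [] (by simp) (by simp)
  simpa using this

lemma pvCut_stop (p : String → Bool) (N R : List String)
    (hN : ∀ y ∈ N, p y = false) :
    pvCut p (N ++ R) N.length = N.length := by
  induction N using List.reverseRecOn with
  | nil => rfl
  | append_singleton M m _ =>
    have hm : p m = false := hN m (by simp)
    simp [pvCut, List.getD, List.append_assoc, hm]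

lemma pvCut_desc (p : String → Bool) (N R : List String)
    (hR : ∀ y ∈ R, p y = true) :
    ∀ k, k ≤ R.length → pvCut p (N ++ R) (N.length + k) = pvCut p (N ++ R) N.length := by
  intro k
  induction k with
  | zero => intro _; rfl
  | succ j ih =>
    intro hj
    have hjlt : j < R.length := by omega
    have hget : (N ++ R).getD (N.length + j) "" = R[j] := by
      simp [List.getD, hjlt]
    have hp : p (R[j]) = true := hR _ (List.getElem_mem hjlt)
    show pvCut p (N ++ R) ((N.length + j) + 1) = _
    rw [pvCut, hget, hp, if_pos rfl, ih (by omega)]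

-- The backward scan from the top of N ++ R stops exactly at N.length.
lemma pvCut_spec (p : String → Bool) (N R : List String)
    (hN : ∀ y ∈ N, p y = false) (hR : ∀ y ∈ R, p y = true) :
    pvCut p (N ++ R) (N ++ R).length = N.length := by
  have h := pvCut_desc p N R hR R.length le_rfl
  rw [List.length_append] at *
  rw [h, pvCut_stop p N R hN]

-- ===== VERDICT (by name: the statement is the Claim_ definition above) =====
theorem fixFirstProd_spec : Claim_equal_fixFirstProd := by
  intro productions _ hPre
  obtain ⟨-, hall⟩ := hPre
  unfold Spec_fixFirstProd fixFirstProd fixFirstProd_alt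
  dsimp only
  revert hall
  generalize PySem.Dict.ofList productions = d
  generalize PySem.List.pyGetD d.keys (-1) "" = key
  generalize pvFreshKey d (d.size + 1) (key ++ "'") = nk
  generalize d.getD key [] = sentences
  intro hall
  have hpt : ∀ s ∈ sentences, pvHeadIs key s = pvStartsKey key s :=
    fun s hs => pvHeadIs_eq_startsKey key s (hall s hs)
  have hpt' : ∀ s ∈ sentences, (!pvHeadIs key s) = (!pvStartsKey key s) :=
    fun s hs => by rw [hpt s hs]
  set p := pvStartsKey key with hp
  set N := sentences.filter (fun s => !p s) with hNdef
  set R := sentences.filter p with hRdef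
  have hN : ∀ y ∈ N, p y = false := by
    intro y hy; have := List.of_mem_filter hy; simpa using this
  have hR : ∀ y ∈ R, p y = true := by
    intro y hy; exact List.of_mem_filter hy
  have horder : PySem.List.sorted sentences (fun s => p s) false = N ++ R :=
    sorted_bool_eq_filter_append p sentences
  rw [horder]
  have hcut : pvCut p (N ++ R) (N ++ R).length = N.length := pvCut_spec p N R hN hR
  rw [hcut]
  rw [any_congr_mem (fun s => pvHeadIs key s) (fun s => p s) sentences hpt,
      any_eq_not_isEmpty_filter, ← hRdef]
  cases hE : R.isEmpty with
  | true =>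
    have hRnil : R = [] := List.isEmpty_iff.mp hE
    simp [hRnil]
  | false =>
    have hRne : R ≠ [] := by simpa [List.isEmpty_iff] using hE
    have hlen : ¬ (N.length = (N ++ R).length) := by
      rw [List.length_append]
      have : R.length ≠ 0 := by simpa [List.length_eq_zero_iff] using hRne
      omega
    rw [if_neg hlen]
    simp only [Bool.not_false, if_true]
    rw [foldl_partition (fun s => pvHeadIs key s)
        (fun s => PySem.Str.slice s (some 1) none ++ " " ++ nk)
        (fun s => s ++ " " ++ nk) sentences [] []]
    simp only [List.nil_append]
    rw [List.filter_congr hpt, List.filter_congr hpt', ← hRdef, ← hNdef]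
    rw [PySem.List.slice_to_natCast, PySem.List.slice_from_natCast,
        List.take_left, List.drop_left]
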